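-- pv_equiv track=rewrite | github.com/ehsanap7/leetcode | 1208.py | equalSubstring
-- ===== SOURCE A (Python) =====
-- def equalSubstring(s: str, t: str, maxCost: int) -> int:
--     ans = 0
--     cur_cost = maxCost
--     left = 0
--
--     for right in range(len(s)):
--         cur_cost -= abs(ord(s[right]) - ord(t[right]))
--
--         while cur_cost < 0 and left < right:
--             cur_cost += abs(ord(s[left]) - ord(t[left]))
--             left += 1
--
--         if 0 <= cur_cost <= maxCost:
--             ans = max(ans, right - left + 1)
--
--     return ans
-- ===== SOURCE B (Python) =====
-- def equalSubstring(s: str, t: str, maxCost: int) -> int: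
--     n = len(s)
--     # prefix[k] = total transform cost of s[:k] -> t[:k]
--     prefix = [0]
--     run = 0
--     for i in range(n):
--         run += abs(ord(s[i]) - ord(t[i]))
--         prefix.append(run)
--     ans = 0
--     for r in range(n):
--         # smallest index lo with prefix[lo] >= prefix[r+1] - maxCost
--         # (prefix is non-decreasing, so binary search is valid)
--         x = prefix[r + 1] - maxCost
--         lo, hi = 0, len(prefix)
--         while lo < hi:
--             mid = (lo + hi) // 2
--             if prefix[mid] < x:
--                 lo = mid + 1
--             else:
--                 hi = mid
--         ans = max(ans, r + 1 - lo)
--     return ans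
-- ===== Notes on version B (the rewrite author's own statement) =====
-- stated objective: alternative
-- what changed: Replaces the amortized two-pointer sliding window by a prefix-sum array of per-character costs plus a hand-written binary search (bisect_left) over the non-decreasing prefix array for each right endpoint.
import Mathlib
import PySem

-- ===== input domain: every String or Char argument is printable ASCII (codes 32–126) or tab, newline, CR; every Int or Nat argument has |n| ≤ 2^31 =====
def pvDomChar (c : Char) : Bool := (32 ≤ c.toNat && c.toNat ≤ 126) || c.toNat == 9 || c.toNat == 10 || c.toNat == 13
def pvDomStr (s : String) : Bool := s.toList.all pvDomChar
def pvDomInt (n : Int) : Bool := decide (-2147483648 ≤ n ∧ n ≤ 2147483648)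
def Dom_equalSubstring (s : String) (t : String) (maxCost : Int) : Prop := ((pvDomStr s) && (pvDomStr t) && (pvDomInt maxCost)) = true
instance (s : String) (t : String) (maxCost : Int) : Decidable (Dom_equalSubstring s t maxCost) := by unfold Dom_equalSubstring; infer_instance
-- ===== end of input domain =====

-- B replaces A's two-pointer sliding window by a cost prefix-sum array plus a binary search
-- per right endpoint (objective: alternative algorithm; equivalence of return values proved below).

-- abs(ord(s[i]) - ord(t[i])); inside Pre_ every index used by either program is in range
def pvCost (sc tc : List Char) (i : Nat) : Int :=
  |((sc.getD i ' ').toNat : Int) - ((tc.getD i ' ').toNat : Int)|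

-- ===== PORT A =====
-- the inner  while cur_cost < 0 and left < right  loop
-- (fuel = right - left bounds the iteration count; it only makes the loop total)
def pvAWhile (c : Nat → Int) (right : Nat) : Nat → Int → Nat → Int × Nat
  | 0, cur, left => (cur, left)
  | fuel + 1, cur, left =>
    if cur < 0 ∧ left < right then pvAWhile c right fuel (cur + c left) (left + 1)
    else (cur, left)

-- body of  for right in range(len(s))  over state (ans, cur_cost, left)
def pvStepA (c : Nat → Int) (maxCost : Int) (st : Int × Int × Nat) (right : Nat) : Int × Int × Nat :=
  let wl := pvAWhile c right (right - st.2.2) (st.2.1 - c right) st.2.2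
  (if 0 ≤ wl.1 ∧ wl.1 ≤ maxCost then max st.1 ((right : Int) - (wl.2 : Int) + 1) else st.1,
   wl.1, wl.2)

def equalSubstring (s : String) (t : String) (maxCost : Int) : Int :=
  ((List.range s.toList.length).foldl (pvStepA (pvCost s.toList t.toList) maxCost) (0, maxCost, 0)).1

-- ===== PORT B =====
-- body of the prefix-building loop:  run += abs(ord(s[i]) - ord(t[i])); prefix.append(run)
def pvStepPre (c : Nat → Int) (st : List Int × Int) (i : Nat) : List Int × Int :=
  (st.1 ++ [st.2 + c i], st.2 + c i)

-- the hand-written bisect_left while-loop of Source B (mid = (lo+hi)//2 inlined;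
-- fuel = hi - lo bounds the iteration count and only makes the loop total)
def pvBisectGo (a : List Int) (x : Int) : Nat → Nat → Nat → Nat
  | 0, lo, _ => lo
  | fuel + 1, lo, hi =>
    if lo < hi then
      if a.getD ((lo + hi) / 2) 0 < x then pvBisectGo a x fuel ((lo + hi) / 2 + 1) hi
      else pvBisectGo a x fuel lo ((lo + hi) / 2)
    else lo

-- body of  for r in range(n)
def pvStepB (pfx : List Int) (maxCost : Int) (ans : Int) (r : Nat) : Int :=
  max ans ((r : Int) + 1 - (pvBisectGo pfx (pfx.getD (r + 1) 0 - maxCost) pfx.length 0 pfx.length : Int))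

def equalSubstring_alt (s : String) (t : String) (maxCost : Int) : Int :=
  let c := pvCost s.toList t.toList
  let n := s.toList.length
  let pfx := ((List.range n).foldl (pvStepPre c) ([0], 0)).1
  (List.range n).foldl (pvStepB pfx maxCost) 0

-- ===== PRECONDITION & SPEC =====
-- Pre_ excludes exactly the inputs with len(t) < len(s), on which both Pythons raise IndexError.
def Pre_equalSubstring (s : String) (t : String) (maxCost : Int) : Prop :=
  s.toList.length ≤ t.toList.length
instance (s : String) (t : String) (maxCost : Int) : Decidable (Pre_equalSubstring s t maxCost) := by
  unfold Pre_equalSubstring; infer_instance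

def pvWitness_equalSubstring : String × String × Int := ("ab", "ba", 1)

def Spec_equalSubstring (s : String) (t : String) (maxCost : Int) (out : Int) : Prop := out = equalSubstring_alt s t maxCost
instance (s : String) (t : String) (maxCost : Int) (out : Int) : Decidable (Spec_equalSubstring s t maxCost out) := by unfold Spec_equalSubstring; infer_instance

-- ===== CLAIM (what is proved, stated in full; the proofs are below) =====
def Claim_equal_equalSubstring : Prop := ∀ (s : String) (t : String) (maxCost : Int), Dom_equalSubstring s t maxCost → Pre_equalSubstring s t maxCost → Spec_equalSubstring s t maxCost (equalSubstring s t maxCost)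

-- ===== LEMMAS AND PROOFS =====

-- prefix sums of the cost function
def pvP (c : Nat → Int) : Nat → Int
  | 0 => 0
  | k + 1 => pvP c k + c k

-- least l with  pvP c k - pvP c l ≤ mc , and k+1 if there is none
def pvH (c : Nat → Int) (mc : Int) (k : Nat) : Nat :=
  Nat.find (p := fun l => pvP c k - pvP c l ≤ mc ∨ l = k + 1) ⟨k + 1, Or.inr rfl⟩

-- value of A's left pointer after k iterations
def pvL (c : Nat → Int) (mc : Int) : Nat → Nat
  | 0 => 0
  | k + 1 => min (pvH c mc (k + 1)) k

theorem pvCost_nonneg (sc tc : List Char) (i : Nat) : 0 ≤ pvCost sc tc i := abs_nonneg _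

theorem pvP_mono (c : Nat → Int) (hc : ∀ i, 0 ≤ c i) {k l : Nat} (h : k ≤ l) :
    pvP c k ≤ pvP c l := by
  induction l with
  | zero => simp_all
  | succ l ih =>
    rcases Nat.lt_or_ge k (l + 1) with h' | h'
    · have := hc l
      have := ih (by omega)
      simp only [pvP]; omega
    · have : k = l + 1 := by omega
      simp [this]

theorem pvH_le (c : Nat → Int) (mc : Int) (k : Nat) : pvH c mc k ≤ k + 1 :=
  Nat.find_le (Or.inr rfl)

theorem pvH_min (c : Nat → Int) (mc : Int) (k : Nat) {l : Nat} (h : l < pvH c mc k) :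
    ¬ (pvP c k - pvP c l ≤ mc) := by
  have h2 : ¬ (pvP c k - pvP c l ≤ mc ∨ l = k + 1) :=
    Nat.find_min (H := ⟨k + 1, Or.inr rfl⟩) h
  tauto

theorem pvH_spec (c : Nat → Int) (mc : Int) (k : Nat) (h : pvH c mc k ≤ k) :
    pvP c k - pvP c (pvH c mc k) ≤ mc := by
  have hfs : pvP c k - pvP c (pvH c mc k) ≤ mc ∨ pvH c mc k = k + 1 :=
    Nat.find_spec (p := fun l => pvP c k - pvP c l ≤ mc ∨ l = k + 1) ⟨k + 1, Or.inr rfl⟩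
  rcases hfs with h' | h'
  · exact h'
  · omega

theorem pvH_eq_of (c : Nat → Int) (mc : Int) (k : Nat) {l : Nat} (h0 : l ≤ k)
    (h1 : pvP c k - pvP c l ≤ mc) (h2 : ∀ l' < l, ¬ (pvP c k - pvP c l' ≤ mc)) :
    pvH c mc k = l := by
  have hle : pvH c mc k ≤ l := Nat.find_le (Or.inl h1)
  have hfs : pvP c k - pvP c (pvH c mc k) ≤ mc ∨ pvH c mc k = k + 1 :=
    Nat.find_spec (p := fun l => pvP c k - pvP c l ≤ mc ∨ l = k + 1) ⟨k + 1, Or.inr rfl⟩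
  by_contra hne
  have hlt : pvH c mc k < l := lt_of_le_of_ne hle hne
  rcases hfs with h' | h'
  · exact h2 _ hlt h'
  · omega

-- the while loop advances left from any admissible start to pvL (r+1)
theorem pvAWhile_spec (c : Nat → Int) (hc : ∀ i, 0 ≤ c i) (mc : Int) (r : Nat) :
    ∀ fuel left, r - left ≤ fuel → left ≤ r →
    (∀ l < left, ¬ (pvP c (r + 1) - pvP c l ≤ mc)) →
    pvAWhile c r fuel (mc - (pvP c (r + 1) - pvP c left)) left
      = (mc - (pvP c (r + 1) - pvP c (pvL c mc (r + 1))), pvL c mc (r + 1)) := by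
  intro fuel
  induction fuel with
  | zero =>
    intro left hf hlr hmin
    have hlr' : left = r := by omega
    subst hlr'
    show (mc - (pvP c (left + 1) - pvP c left), left) = _
    by_cases hcur : mc - (pvP c (left + 1) - pvP c left) < 0
    · have hH : left + 1 ≤ pvH c mc (left + 1) := by
        by_contra hcon
        have hsp := pvH_spec c mc (left + 1) (by omega)
        rcases Nat.lt_or_ge (pvH c mc (left + 1)) left with h2 | h2
        · exact hmin _ h2 hsp
        · have he : pvH c mc (left + 1) = left := by omega
          rw [he] at hsp
          omega
      have hL : pvL c mc (left + 1) = left := by simp only [pvL]; omega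
      rw [hL]
    · have hH : pvH c mc (left + 1) = left :=
        pvH_eq_of c mc (left + 1) (by omega) (by omega) hmin
      have hL : pvL c mc (left + 1) = left := by simp only [pvL]; omega
      rw [hL]
  | succ fuel ih =>
    intro left hf hlr hmin
    simp only [pvAWhile]
    by_cases hstep : mc - (pvP c (r + 1) - pvP c left) < 0 ∧ left < r
    · rw [if_pos hstep]
      have heq : mc - (pvP c (r + 1) - pvP c left) + c left
           = mc - (pvP c (r + 1) - pvP c (left + 1)) := by
        simp only [pvP]; ring
      rw [heq]
      apply ih (left + 1) (by omega) (by omega)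
      intro l hl
      rcases Nat.lt_or_ge l left with h' | h'
      · exact hmin l h'
      · have : l = left := by omega
        subst this
        intro hcon
        have := hstep.1
        omega
    · rw [if_neg hstep]
      by_cases hcur : mc - (pvP c (r + 1) - pvP c left) < 0
      · have hlr' : left = r := by
          rcases not_and_or.mp hstep with h' | h'
          · exact absurd hcur h'
          · omega
        subst hlr'
        have hH : left + 1 ≤ pvH c mc (left + 1) := by
          by_contra hcon
          have hsp := pvH_spec c mc (left + 1) (by omega)
          rcases Nat.lt_or_ge (pvH c mc (left + 1)) left with h2 | h2
          · exact hmin _ h2 hsp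
          · have he : pvH c mc (left + 1) = left := by omega
            rw [he] at hsp
            omega
        have hL : pvL c mc (left + 1) = left := by simp only [pvL]; omega
        rw [hL]
      · have hH : pvH c mc (r + 1) = left :=
          pvH_eq_of c mc (r + 1) (by omega) (by omega) hmin
        have hL : pvL c mc (r + 1) = left := by simp only [pvL]; omega
        rw [hL]

-- the prefix-building fold produces the table of prefix sums
theorem pvPrefix_eq (c : Nat → Int) : ∀ n : Nat,
    (List.range n).foldl (pvStepPre c) ([0], 0)
      = ((List.range (n + 1)).map (pvP c), pvP c n) := by
  intro n
  induction n with
  | zero => simp [pvP]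
  | succ n ih =>
    rw [List.range_succ, List.foldl_append, ih]
    simp only [List.foldl_cons, List.foldl_nil, pvStepPre]
    rw [List.range_succ (n := n + 1), List.map_append]
    simp [pvP]

theorem pvPrefix_getD (c : Nat → Int) (n i : Nat) (h : i < n + 1) :
    ((List.range (n + 1)).map (pvP c)).getD i 0 = pvP c i := by
  rw [List.getD_eq_getElem?_getD, List.getElem?_eq_getElem (by simpa using h)]
  simp

-- binary-search invariant: the result separates the values < x from those ≥ x
theorem pvBisectGo_spec (a : List Int) (x : Int)
    (mono : ∀ i j, i ≤ j → j < a.length → a.getD i 0 ≤ a.getD j 0) :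
    ∀ fuel lo hi, hi - lo ≤ fuel → lo ≤ hi → hi ≤ a.length →
    (∀ i < lo, a.getD i 0 < x) → (∀ i, hi ≤ i → i < a.length → x ≤ a.getD i 0) →
    lo ≤ pvBisectGo a x fuel lo hi ∧ pvBisectGo a x fuel lo hi ≤ hi ∧
    (∀ i < pvBisectGo a x fuel lo hi, a.getD i 0 < x) ∧
    (∀ i, pvBisectGo a x fuel lo hi ≤ i → i < a.length → x ≤ a.getD i 0) := by
  intro fuel
  induction fuel with
  | zero =>
    intro lo hi hf hlh hha hlt hge
    have : lo = hi := by omega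
    subst this
    exact ⟨le_refl _, le_refl _, hlt, hge⟩
  | succ fuel ih =>
    intro lo hi hf hlh hha hlt hge
    simp only [pvBisectGo]
    by_cases hlo : lo < hi
    · rw [if_pos hlo]
      by_cases hv : a.getD ((lo + hi) / 2) 0 < x
      · rw [if_pos hv]
        have H := ih ((lo + hi) / 2 + 1) hi (by omega) (by omega) hha
          (fun i hi' => by
            rcases Nat.lt_or_ge i lo with h' | h'
            · exact hlt i h'
            · exact lt_of_le_of_lt (mono i ((lo + hi) / 2) (by omega) (by omega)) hv)
          hge
        exact ⟨le_trans (by omega) H.1, H.2.1, H.2.2.1, H.2.2.2⟩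
      · rw [if_neg hv]
        have H := ih lo ((lo + hi) / 2) (by omega) (by omega) (by omega) hlt
          (fun i hi1 hi2 => le_trans (not_lt.mp hv) (mono ((lo + hi) / 2) i hi1 hi2))
        exact ⟨H.1, le_trans H.2.1 (by omega), H.2.2.1, H.2.2.2⟩
    · rw [if_neg hlo]
      have : lo = hi := by omega
      subst this
      exact ⟨le_refl _, le_refl _, hlt, hge⟩

-- B's fold keeps a nonnegative answer
theorem pvAnsB_nonneg (pfx : List Int) (mc : Int) : ∀ n : Nat,
    0 ≤ (List.range n).foldl (pvStepB pfx mc) 0 := by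
  intro n
  induction n with
  | zero => simp
  | succ n ih =>
    rw [List.range_succ, List.foldl_append]
    simp only [List.foldl_cons, List.foldl_nil, pvStepB]
    exact le_trans ih (le_max_left _ _)

-- the joint invariant: A's state after n steps vs B's answer after n steps
theorem pvMain (c : Nat → Int) (hc : ∀ i, 0 ≤ c i) (mc : Int) (N : Nat) :
    ∀ n ≤ N,
    (List.range n).foldl (pvStepA c mc) (0, mc, 0)
      = ((List.range n).foldl (pvStepB ((List.range (N + 1)).map (pvP c)) mc) 0,
         mc - (pvP c n - pvP c (pvL c mc n)), pvL c mc n) := by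
  intro n
  induction n with
  | zero => intro _; simp [pvL, pvP]
  | succ r ihr =>
    intro hn
    rw [List.range_succ, List.foldl_append, List.foldl_append, ihr (by omega)]
    simp only [List.foldl_cons, List.foldl_nil]
    set pfx := (List.range (N + 1)).map (pvP c) with hpre
    set ansB := (List.range r).foldl (pvStepB pfx mc) 0 with hansB
    have hlen : pfx.length = N + 1 := by simp [hpre]
    have hget : ∀ i < N + 1, pfx.getD i 0 = pvP c i := fun i hi => pvPrefix_getD c N i hi
    have hmono : ∀ i j, i ≤ j → j < pfx.length → pfx.getD i 0 ≤ pfx.getD j 0 := by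
      intro i j hij hj
      rw [hlen] at hj
      rw [hget i (by omega), hget j hj]
      exact pvP_mono c hc hij
    have hLr : pvL c mc r ≤ r ∧ (r = 0 → pvL c mc r = 0) := by
      cases r with
      | zero => simp [pvL]
      | succ r' => refine ⟨?_, by omega⟩; simp only [pvL]; omega
    have hminL : ∀ l < pvL c mc r, ¬ (pvP c (r + 1) - pvP c l ≤ mc) := by
      intro l hl hle
      cases r with
      | zero => simp [pvL] at hl
      | succ r' =>
        simp only [pvL] at hl
        have hl' : l < pvH c mc (r' + 1) := by omega
        have := pvH_min c mc (r' + 1) hl'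
        have hP : pvP c (r' + 1) ≤ pvP c (r' + 1 + 1) := pvP_mono c hc (by omega)
        omega
    have hcurstep : mc - (pvP c r - pvP c (pvL c mc r)) - c r
        = mc - (pvP c (r + 1) - pvP c (pvL c mc r)) := by
      simp only [pvP]; ring
    have hwl := pvAWhile_spec c hc mc r (r - pvL c mc r) (pvL c mc r) (le_refl _)
        hLr.1 hminL
    have hx : pfx.getD (r + 1) 0 = pvP c (r + 1) := hget (r + 1) (by omega)
    have hbis := pvBisectGo_spec pfx (pvP c (r + 1) - mc) hmono pfx.length 0 pfx.length
        (by omega) (by omega) (le_refl _) (by omega) (by intro i h1 h2; omega)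
    set k := pvBisectGo pfx (pvP c (r + 1) - mc) pfx.length 0 pfx.length with hk
    have hH := pvH_le c mc (r + 1)
    have hansB0 : 0 ≤ ansB := pvAnsB_nonneg pfx mc r
    simp only [pvStepA, pvStepB, hx]
    rw [hcurstep, hwl, ← hk]
    by_cases hcase : pvH c mc (r + 1) ≤ r
    · -- both update with the same window length
      have hL1 : pvL c mc (r + 1) = pvH c mc (r + 1) := by simp only [pvL]; omega
      have hcur0 : 0 ≤ mc - (pvP c (r + 1) - pvP c (pvL c mc (r + 1))) := by
        rw [hL1]
        have := pvH_spec c mc (r + 1) (by omega)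
        omega
      have hcurM : mc - (pvP c (r + 1) - pvP c (pvL c mc (r + 1))) ≤ mc := by
        have := pvP_mono c hc (k := pvL c mc (r + 1)) (l := r + 1) (by rw [hL1]; omega)
        omega
      have hkH : k = pvH c mc (r + 1) := by
        by_contra hne
        rcases Nat.lt_or_ge k (pvH c mc (r + 1)) with h' | h'
        · have hkN : k < N + 1 := by omega
          have hxk := hbis.2.2.2 k (le_refl _) (by omega)
          rw [hget k hkN] at hxk
          have := pvH_min c mc (r + 1) h'
          omega
        · have hlt := hbis.2.2.1 (pvH c mc (r + 1)) (by omega)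
          rw [hget _ (by omega)] at hlt
          have := pvH_spec c mc (r + 1) (by omega)
          omega
      rw [if_pos ⟨hcur0, hcurM⟩, hkH, hL1]
      have : (r : Int) - (pvH c mc (r + 1) : Int) + 1 = (r : Int) + 1 - (pvH c mc (r + 1) : Int) := by ring
      rw [this]
    · -- A does not update; B's candidate length is ≤ 0
      have hL1 : pvL c mc (r + 1) = r := by simp only [pvL]; omega
      have hcr : ¬ (pvP c (r + 1) - pvP c r ≤ mc) := by
        intro hle
        have : pvH c mc (r + 1) ≤ r := Nat.find_le (Or.inl hle)
        omega
      have hcurneg : mc - (pvP c (r + 1) - pvP c (pvL c mc (r + 1))) < 0 := by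
        rw [hL1]; omega
      rw [if_neg (by intro hcon; omega)]
      have hkbig : r + 1 ≤ k := by
        by_contra h
        have hkN : k < N + 1 := by omega
        have hxk := hbis.2.2.2 k (le_refl _) (by omega)
        rw [hget k hkN] at hxk
        rcases Nat.lt_or_ge k r with h2 | h2
        · have := pvH_min c mc (r + 1) (l := k) (by omega)
          omega
        · have : k = r := by omega
          rw [this] at hxk
          omega
      have hkle : (r : Int) + 1 - (k : Int) ≤ 0 := by
        have : (r : Int) + 1 ≤ (k : Int) := by exact_mod_cast hkbig
        omega
      rw [max_eq_left (le_trans hkle hansB0)]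

-- ===== VERDICT (by name: the statement is the Claim_ definition above) =====
theorem equalSubstring_spec : Claim_equal_equalSubstring := by
  intro s t maxCost _dom _pre
  unfold Spec_equalSubstring
  have ha : equalSubstring s t maxCost
      = ((List.range s.toList.length).foldl (pvStepA (pvCost s.toList t.toList) maxCost) (0, maxCost, 0)).1 := rfl
  have hb : equalSubstring_alt s t maxCost
      = (List.range s.toList.length).foldl
          (pvStepB (((List.range s.toList.length).foldl (pvStepPre (pvCost s.toList t.toList)) ([0], 0)).1) maxCost) 0 := rfl
  rw [ha, hb, pvPrefix_eq,
      pvMain (pvCost s.toList t.toList) (pvCost_nonneg s.toList t.toList) maxCost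
        s.toList.length s.toList.length (le_refl _)]
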